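-- pv_equiv track=rewrite | github.com/exg/sqs-batch-client | src/sqs_batch_client/__init__.py | _get_batch_len
-- ===== SOURCE A (Python) =====
-- from collections.abc import Iterable, Iterator
--
-- def _get_batch_len(sizes: Iterable[int], max_batch_len: int, max_batch_size: int) -> int:
--     batch_len = 0
--     batch_size = 0
--     for size in sizes:
--         if batch_len < max_batch_len and batch_size + size <= max_batch_size:
--             batch_len += 1
--             batch_size += size
--         else:
--             break
--     return batch_len
-- ===== SOURCE B (Python) =====
-- from itertools import accumulate
--
--
-- def _get_batch_len(sizes, max_batch_len, max_batch_size):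
--     # The batch ends at the first index where either cap fails, so the answer is
--     # the minimum of three independent bounds: the number of items, the (clamped)
--     # length cap, and the position of the first prefix sum over the size cap.
--     prefix = list(accumulate(sizes))
--     first_over = next((i for i, p in enumerate(prefix) if p > max_batch_size),
--                       len(prefix))
--     return min(len(prefix), max(max_batch_len, 0), first_over)
-- ===== Notes on version B (the rewrite author's own statement) =====
-- stated objective: alternative
-- what changed: A's single stateful scan testing both caps together with a break is replaced by computing three independent bounds (item count, clamped length cap, index of first prefix sum exceeding the size cap) and returning their minimum.
import Mathlib
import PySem

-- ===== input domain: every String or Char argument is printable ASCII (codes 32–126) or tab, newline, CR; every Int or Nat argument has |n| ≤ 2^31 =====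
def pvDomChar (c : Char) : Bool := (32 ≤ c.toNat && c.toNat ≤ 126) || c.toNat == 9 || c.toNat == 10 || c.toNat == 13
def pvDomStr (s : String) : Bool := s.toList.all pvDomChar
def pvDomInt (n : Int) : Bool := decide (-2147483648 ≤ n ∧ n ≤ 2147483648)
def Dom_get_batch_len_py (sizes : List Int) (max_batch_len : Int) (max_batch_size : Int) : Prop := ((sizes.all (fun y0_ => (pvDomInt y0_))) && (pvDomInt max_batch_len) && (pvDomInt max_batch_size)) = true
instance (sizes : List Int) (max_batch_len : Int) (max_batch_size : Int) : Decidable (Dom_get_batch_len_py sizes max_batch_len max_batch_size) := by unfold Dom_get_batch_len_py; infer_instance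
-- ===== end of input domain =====

-- B replaces A's stateful take-while scan by the minimum of three independent bounds
-- (item count, clamped length cap, index of first over-cap prefix sum); return value only
-- (A consumes its iterable lazily, B materializes it).


-- ===== PORT A =====
-- loop with mutable state (batch_len, batch_size) and break, as in A
def pvGoA (ml ms : Int) : List Int → Int → Int → Int
  | [], bl, _ => bl
  | s :: rest, bl, bs =>
    if bl < ml ∧ bs + s ≤ ms then pvGoA ml ms rest (bl + 1) (bs + s) else bl

def get_batch_len_py (sizes : List Int) (max_batch_len : Int) (max_batch_size : Int) : Int :=
  pvGoA max_batch_len max_batch_size sizes 0 0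

-- ===== PORT B =====
-- itertools.accumulate: running sums starting from the first element
def pvAccumulate (acc : Int) : List Int → List Int
  | [] => []
  | s :: rest => (acc + s) :: pvAccumulate (acc + s) rest

-- next((i for i, p in enumerate(prefix) if p > ms), len(prefix))
def pvFirstOver (ms : Int) : List Int → Nat
  | [] => 0
  | p :: rest => if ms < p then 0 else (pvFirstOver ms rest) + 1

def get_batch_len_py_alt (sizes : List Int) (max_batch_len : Int) (max_batch_size : Int) : Int :=
  let pre := pvAccumulate 0 sizes
  min (min (pre.length : Int) (max max_batch_len 0))
      ((pvFirstOver max_batch_size pre : Nat) : Int)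

-- ===== PRECONDITION & SPEC =====
def Spec_get_batch_len_py (sizes : List Int) (max_batch_len : Int) (max_batch_size : Int) (out : Int) : Prop := out = get_batch_len_py_alt sizes max_batch_len max_batch_size
instance (sizes : List Int) (max_batch_len : Int) (max_batch_size : Int) (out : Int) : Decidable (Spec_get_batch_len_py sizes max_batch_len max_batch_size out) := by unfold Spec_get_batch_len_py; infer_instance

-- ===== CLAIM =====
def Claim_equal_get_batch_len_py : Prop := ∀ (sizes : List Int) (max_batch_len : Int) (max_batch_size : Int), Dom_get_batch_len_py sizes max_batch_len max_batch_size → Spec_get_batch_len_py sizes max_batch_len max_batch_size (get_batch_len_py sizes max_batch_len max_batch_size)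

-- ===== LEMMAS AND PROOFS =====
theorem pvFirstOver_le_length (ms : Int) (l : List Int) : pvFirstOver ms l ≤ l.length := by
  induction l with
  | nil => simp [pvFirstOver]
  | cons p rest ih =>
    simp only [pvFirstOver, List.length_cons]
    split <;> omega

theorem pvKey (ml ms : Int) (sizes : List Int) : ∀ (i bs : Int),
    pvGoA ml ms sizes i bs =
      i + min (min ((sizes.length : Int)) (max (ml - i) 0))
              ((pvFirstOver ms (pvAccumulate bs sizes) : Nat) : Int) := by
  induction sizes with
  | nil => intro i bs; simp [pvGoA, pvAccumulate, pvFirstOver]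
  | cons s rest ih =>
    intro i bs
    simp only [pvGoA, pvAccumulate, pvFirstOver, List.length_cons]
    by_cases h : i < ml ∧ bs + s ≤ ms
    · rw [if_pos h, if_neg (by omega : ¬ ms < bs + s), ih (i + 1) (bs + s)]
      push_cast
      omega
    · rw [if_neg h]
      rcases Decidable.not_and_iff_or_not.mp h with h1 | h1
      · have := pvFirstOver_le_length ms (pvAccumulate (bs + s) rest)
        split <;> push_cast <;> omega
      · rw [if_pos (by omega : ms < bs + s)]
        push_cast
        omega

-- ===== VERDICT =====
theorem get_batch_len_py_spec : Claim_equal_get_batch_len_py := by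
  intro sizes ml ms _
  unfold Spec_get_batch_len_py get_batch_len_py get_batch_len_py_alt
  have hlen : ∀ (bs : Int) (l : List Int), (pvAccumulate bs l).length = l.length := by
    intro bs l
    induction l generalizing bs with
    | nil => rfl
    | cons x xs ih => simp [pvAccumulate, ih]
  have := pvKey ml ms sizes 0 0
  simpa [hlen] using this
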